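-- pv_equiv track=rewrite | github.com/af654/Path-Planning-With-Gazebo | part2code/nearest_neighbors.py | resort_proximity_nodes
-- ===== SOURCE A (Python) =====
-- def resort_proximity_nodes(close_nodes, distances, index):
--     while index > 0 and distances[index] < distances[index - 1]:
--         temp = distances[index]
--         distances[index] = distances[index - 1]
--         distances[index - 1] = temp
--
--         temp_node = close_nodes[index]
--         close_nodes[index] = close_nodes[index - 1]
--         close_nodes[index - 1] = temp_node
--
--         index -= 1
--
--     return index
-- ===== SOURCE B (Python) =====
-- def resort_proximity_nodes(close_nodes, distances, index):
--     if index <= 0: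
--         return index
--     val = distances[index]
--     node = close_nodes[index]
--     pos = index
--     while pos > 0 and val < distances[pos - 1]:
--         pos -= 1
--     distances[pos + 1:index + 1] = distances[pos:index]
--     close_nodes[pos + 1:index + 1] = close_nodes[pos:index]
--     distances[pos] = val
--     close_nodes[pos] = node
--     return pos
-- ===== Notes on version B (the rewrite author's own statement) =====
-- stated objective: alternative
-- what changed: Replaces the repeated-swap bubble loop with a read-only leftward scan that finds the landing slot, followed by one block shift via slice assignment and a single write of the saved element.
-- outside the precondition, e.g. on resort_proximity_nodes([], [1, 2], 1): A returns 1, B raises IndexError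
import Mathlib
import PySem

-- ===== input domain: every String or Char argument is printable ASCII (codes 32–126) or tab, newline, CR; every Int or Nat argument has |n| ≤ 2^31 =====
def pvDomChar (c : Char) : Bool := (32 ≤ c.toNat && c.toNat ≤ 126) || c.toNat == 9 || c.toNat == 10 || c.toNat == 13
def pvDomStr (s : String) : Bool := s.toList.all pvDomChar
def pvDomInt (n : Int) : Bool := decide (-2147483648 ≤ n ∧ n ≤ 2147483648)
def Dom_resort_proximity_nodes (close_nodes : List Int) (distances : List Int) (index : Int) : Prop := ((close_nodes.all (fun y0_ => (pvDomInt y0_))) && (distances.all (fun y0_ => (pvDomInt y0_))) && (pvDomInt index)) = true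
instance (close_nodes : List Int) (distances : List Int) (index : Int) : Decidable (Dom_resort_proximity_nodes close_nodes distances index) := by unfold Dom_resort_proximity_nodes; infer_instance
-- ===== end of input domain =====

-- B replaces A's swap-loop with a read-only scan for the landing slot plus one block move;
-- equivalence proved here is about the RETURN value only (both Pythons mutate the lists the same way,
-- which Lean's immutable ports do not model).


-- ===== PORT A =====
-- A's while loop: swap distances[i],distances[i-1] and close_nodes[i],close_nodes[i-1]
-- while index > 0 and distances[index] < distances[index-1]; the 'none' arms exit where Python raises.
def pvLoopA (cn d : List Int) (i : Int) : Int :=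
  if _h : 0 < i then
    match PySem.List.pyGet? d i, PySem.List.pyGet? d (i - 1) with
    | some a, some b =>
        if a < b then
          let d' := PySem.List.pySetD (PySem.List.pySetD d i b) (i - 1) a
          let cn' :=
            match PySem.List.pyGet? cn i, PySem.List.pyGet? cn (i - 1) with
            | some x, some y => PySem.List.pySetD (PySem.List.pySetD cn i y) (i - 1) x
            | _, _ => cn
          pvLoopA cn' d' (i - 1)
        else i
    | _, _ => i
  else i
termination_by i.toNat
decreasing_by omega

def resort_proximity_nodes (close_nodes : List Int) (distances : List Int) (index : Int) : Int :=
  pvLoopA close_nodes distances index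

-- ===== PORT B =====
-- B's scan phase: pos walks left while pos > 0 and val < distances[pos-1].
def pvFindPos (d : List Int) (val : Int) (pos : Int) : Int :=
  if _h : 0 < pos then
    match PySem.List.pyGet? d (pos - 1) with
    | some p => if val < p then pvFindPos d val (pos - 1) else pos
    | none => pos
  else pos
termination_by pos.toNat
decreasing_by omega

def resort_proximity_nodes_alt (close_nodes : List Int) (distances : List Int) (index : Int) : Int :=
  if index ≤ 0 then index
  else
    match PySem.List.pyGet? distances index, PySem.List.pyGet? close_nodes index with
    | some val, some _node =>
        -- the block moves (slice assignments) mutate the arrays only; the return value is pos: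
        pvFindPos distances val index
    | _, _ => index   -- B raises IndexError here (outside Pre_)

-- ===== PRECONDITION & SPEC =====
-- Pre_ excludes inputs where either program raises IndexError: with index > 0 both read
-- distances[index] and (possibly) close_nodes[index], so both lists must be long enough;
-- it also excludes the corner index > 0, index < len(distances), len(close_nodes) ≤ index with no
-- swap needed, where A happens to return but B's upfront close_nodes[index] read raises (cited).
def Pre_resort_proximity_nodes (close_nodes : List Int) (distances : List Int) (index : Int) : Prop :=
  index ≤ 0 ∨ (index < distances.length ∧ index < close_nodes.length)
instance (close_nodes : List Int) (distances : List Int) (index : Int) : Decidable (Pre_resort_proximity_nodes close_nodes distances index) := by unfold Pre_resort_proximity_nodes; infer_instance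
def pvWitness_resort_proximity_nodes : List Int × List Int × Int := ([10, 20, 30], [5, 9, 3], 2)

def Spec_resort_proximity_nodes (close_nodes : List Int) (distances : List Int) (index : Int) (out : Int) : Prop := out = resort_proximity_nodes_alt close_nodes distances index
instance (close_nodes : List Int) (distances : List Int) (index : Int) (out : Int) : Decidable (Spec_resort_proximity_nodes close_nodes distances index out) := by unfold Spec_resort_proximity_nodes; infer_instance

-- ===== CLAIM (what is proved, stated in full; the proofs are below) =====
def Claim_equal_resort_proximity_nodes : Prop := ∀ (close_nodes : List Int) (distances : List Int) (index : Int), Dom_resort_proximity_nodes close_nodes distances index → Pre_resort_proximity_nodes close_nodes distances index → Spec_resort_proximity_nodes close_nodes distances index (resort_proximity_nodes close_nodes distances index)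

-- ===== LEMMAS AND PROOFS =====

-- pvFindPos only reads indices < pos, so lists agreeing below pos give the same result.
theorem pvFindPos_congr (d d' : List Int) (val : Int) (pos : Int)
    (hag : ∀ j : Int, 0 ≤ j → j < pos → PySem.List.pyGet? d j = PySem.List.pyGet? d' j) :
    pvFindPos d val pos = pvFindPos d' val pos := by
  by_cases h : 0 < pos
  · conv_lhs => rw [pvFindPos]
    conv_rhs => rw [pvFindPos]
    simp only [dif_pos h]
    rw [← hag (pos - 1) (by omega) (by omega)]
    cases hp : PySem.List.pyGet? d (pos - 1) with
    | none => rfl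
    | some p =>
        by_cases hv : val < p
        · simp only [if_pos hv]
          exact pvFindPos_congr d d' val (pos - 1) (fun j h0 hj => hag j h0 (by omega))
        · simp only [if_neg hv]
  · conv_lhs => rw [pvFindPos]
    conv_rhs => rw [pvFindPos]
    simp [dif_neg h]
termination_by pos.toNat
decreasing_by omega

-- Main invariant: if distances[i] = val then A's loop from i returns B's scan position.
theorem loopA_eq_findPos (cn d : List Int) (i val : Int)
    (hi : 0 ≤ i) (hlen : i < (d.length : Int))
    (hval : PySem.List.pyGet? d i = some val) :
    pvLoopA cn d i = pvFindPos d val i := by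
  by_cases h : 0 < i
  · rw [pvLoopA, pvFindPos]
    simp only [dif_pos h]
    rw [hval]
    have hprev : PySem.List.pyGet? d (i - 1) = some (d[(i - 1).toNat]'(by omega)) :=
      PySem.List.pyGet?_eq_some_getElem d (i := i - 1) (by omega) (by omega)
    rw [hprev]
    by_cases hv : val < d[(i - 1).toNat]'(by omega)
    · simp only [if_pos hv]
      set b := d[(i - 1).toNat]'(by omega) with hb
      set d' := PySem.List.pySetD (PySem.List.pySetD d i b) (i - 1) val with hd'
      have hset : d' = (d.set i.toNat b).set (i - 1).toNat val := by
        rw [hd', PySem.List.pySetD_of_nonneg d b (by omega),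
            PySem.List.pySetD_of_nonneg (d.set i.toNat b) val (by omega)]
      have hlen' : d'.length = d.length := by simp [hset]
      have hget' : ∀ j : Int, 0 ≤ j → j < i - 1 →
          PySem.List.pyGet? d' j = PySem.List.pyGet? d j := by
        intro j h0 hj
        rw [hset, PySem.List.pyGet?_of_nonneg _ h0, PySem.List.pyGet?_of_nonneg d h0,
            List.getElem?_set_ne (by omega), List.getElem?_set_ne (by omega)]
      have hval' : PySem.List.pyGet? d' (i - 1) = some val := by
        rw [hset, PySem.List.pyGet?_of_nonneg _ (by omega),
            List.getElem?_set_self (by simp; omega)]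
      have ih := loopA_eq_findPos
        (match PySem.List.pyGet? cn i, PySem.List.pyGet? cn (i - 1) with
         | some x, some y => PySem.List.pySetD (PySem.List.pySetD cn i y) (i - 1) x
         | _, _ => cn) d' (i - 1) val (by omega) (by rw [hlen']; omega) hval'
      rw [ih]
      exact pvFindPos_congr d' d val (i - 1) (fun j h0 hj => (hget' j h0 hj))
    · simp only [if_neg hv]
  · rw [pvLoopA, pvFindPos]
    simp [dif_neg h]
termination_by i.toNat
decreasing_by omega

-- ===== VERDICT (by name: the statement is the Claim_ definition above) =====
theorem resort_proximity_nodes_spec : Claim_equal_resort_proximity_nodes := by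
  intro cn d i _hdom hpre
  unfold Spec_resort_proximity_nodes resort_proximity_nodes resort_proximity_nodes_alt
  by_cases h : i ≤ 0
  · rw [if_pos h, pvLoopA]
    simp only [dif_neg (by omega : ¬ 0 < i)]
  · rw [if_neg h]
    rcases hpre with hpre | ⟨hd, hc⟩
    · omega
    · have hvd : PySem.List.pyGet? d i = some (d[i.toNat]'(by omega)) :=
        PySem.List.pyGet?_eq_some_getElem d (i := i) (by omega) (by omega)
      have hvc : PySem.List.pyGet? cn i = some (cn[i.toNat]'(by omega)) :=
        PySem.List.pyGet?_eq_some_getElem cn (i := i) (by omega) (by omega)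
      rw [hvd, hvc]
      exact loopA_eq_findPos cn d i _ (by omega) (by omega) hvd
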